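-- pv_equiv track=rewrite | github.com/leekangmmin/- | app/advanced.py | personal_weakness_ranking
-- ===== SOURCE A (Python) =====
-- from collections import Counter
-- from typing import Any, Literal
--
-- def personal_weakness_ranking(rows: list[dict[str, Any]], limit: int = 10) -> list[str]:
--     recent = rows[-limit:]
--     counter = Counter()
--     for row in recent:
--         g = row.get("grammar_stats", {})
--         for key in ["run_on", "subject_verb", "tense", "article", "preposition", "punctuation"]:
--             counter[key] += int(g.get(key, 0))
--     ranking = [f"{k} ({v})" for k, v in counter.most_common(3) if v > 0]
--     return ranking or ["no dominant pattern"]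
-- ===== SOURCE B (Python) =====
-- def personal_weakness_ranking(rows: list, limit: int = 10) -> list:
--     # Column-major direct sums (no Counter) + top-3 by repeated first-maximum
--     # selection with early stop (no sort / most_common).
--     recent = rows[-limit:]
--     KEYS = ("run_on", "subject_verb", "tense", "article", "preposition", "punctuation")
--     pairs = [(k, sum(int(r.get("grammar_stats", {}).get(k, 0)) for r in recent)) for k in KEYS]
--
--     def select(pairs, n):
--         if n == 0 or not pairs:
--             return []
--         best = max(pairs, key=lambda kv: kv[1])  # first maximum = Counter's tie-break
--         if best[1] <= 0:
--             return []
--         rest = list(pairs)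
--         rest.remove(best)
--         return ["%s (%d)" % best] + select(rest, n - 1)
--
--     return select(pairs, 3) or ["no dominant pattern"]
-- ===== Notes on version B (the rewrite author's own statement) =====
-- stated objective: alternative
-- what changed: Replaces A's row-major Counter accumulation plus most_common(3)/filter by column-major direct sums per category and a top-3 obtained by repeated first-maximum selection with early stop on a non-positive maximum (no dict, no sort); first-maximum selection reproduces Counter.most_common's stable tie order.
import Mathlib
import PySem

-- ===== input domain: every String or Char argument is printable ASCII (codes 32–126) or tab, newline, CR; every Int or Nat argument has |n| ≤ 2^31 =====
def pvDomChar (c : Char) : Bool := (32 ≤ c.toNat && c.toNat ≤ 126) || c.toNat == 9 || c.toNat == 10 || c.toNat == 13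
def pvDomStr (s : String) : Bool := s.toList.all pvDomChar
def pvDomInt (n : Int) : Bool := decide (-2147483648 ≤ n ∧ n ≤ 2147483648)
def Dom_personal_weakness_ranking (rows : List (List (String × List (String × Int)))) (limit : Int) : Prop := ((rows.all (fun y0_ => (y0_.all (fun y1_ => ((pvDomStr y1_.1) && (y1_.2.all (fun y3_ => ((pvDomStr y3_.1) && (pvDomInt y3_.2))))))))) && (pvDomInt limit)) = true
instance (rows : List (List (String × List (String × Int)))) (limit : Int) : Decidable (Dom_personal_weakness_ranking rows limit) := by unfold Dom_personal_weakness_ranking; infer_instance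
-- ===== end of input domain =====

-- B replaces A's Counter accumulation + most_common(3) by column-major direct sums and a
-- top-3 built by repeated first-maximum selection with early stop (objective: alternative).

-- shared accessor: row.get("grammar_stats", {}).get(key, 0) (int() on an int is the identity)
def pvKeys : List String := ["run_on", "subject_verb", "tense", "article", "preposition", "punctuation"]

def pvStat (row : List (String × List (String × Int))) (key : String) : Int :=
  (PySem.Dict.mk ((PySem.Dict.mk row).getD "grammar_stats" [])).getD key 0

-- ===== PORT A =====
def personal_weakness_ranking (rows : List (List (String × List (String × Int)))) (limit : Int) : List String :=
  let recent := PySem.List.slice rows (some (-limit)) none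
  let counter : PySem.Dict String Int := recent.foldl (fun c row =>
      pvKeys.foldl (fun c key => c.insert key (c.getD key 0 + pvStat row key)) c)
    PySem.Dict.empty
  -- most_common(3) = stable reverse sort by count, take 3
  let ranking := ((PySem.List.sorted counter.items (fun kv => kv.2) true).take 3).filterMap
    (fun kv => if kv.2 > 0 then some (kv.1 ++ " (" ++ PySem.Int.toStr kv.2 ++ ")") else none)
  if ranking.isEmpty then ["no dominant pattern"] else ranking

-- ===== PORT B =====
-- Source B's select(pairs, n): recursion on n; max(pairs, key=…) is the FIRST maximum;
-- rest = list(pairs); rest.remove(best) is erasure of the first occurrence of best.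
def pvSelect (pairs : List (String × Int)) (n : Nat) : List String :=
  match n with
  | 0 => []
  | n + 1 =>
    match PySem.List.max? pairs (fun kv => kv.2) with
    | none => []
    | some best =>
      if best.2 ≤ 0 then []
      else (best.1 ++ " (" ++ PySem.Int.toStr best.2 ++ ")") :: pvSelect (pairs.erase best) n

def personal_weakness_ranking_alt (rows : List (List (String × List (String × Int)))) (limit : Int) : List String :=
  let recent := PySem.List.slice rows (some (-limit)) none
  let pairs := pvKeys.map (fun k => (k, (recent.map (fun r => pvStat r k)).sum))
  let out := pvSelect pairs 3
  if out.isEmpty then ["no dominant pattern"] else out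

-- ===== PRECONDITION & SPEC =====
def Spec_personal_weakness_ranking (rows : List (List (String × List (String × Int)))) (limit : Int) (out : List String) : Prop := out = personal_weakness_ranking_alt rows limit
instance (rows : List (List (String × List (String × Int)))) (limit : Int) (out : List String) : Decidable (Spec_personal_weakness_ranking rows limit out) := by unfold Spec_personal_weakness_ranking; infer_instance

-- ===== CLAIM (what is proved, stated in full; the proofs are below) =====
def Claim_equal_personal_weakness_ranking : Prop := ∀ (rows : List (List (String × List (String × Int)))) (limit : Int), Dom_personal_weakness_ranking rows limit → Spec_personal_weakness_ranking rows limit (personal_weakness_ranking rows limit)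

-- ===== LEMMAS AND PROOFS =====

-- the 6-key literal dict shape the counter keeps throughout A's loop
def pvMk6 (a b c d e f : Int) : PySem.Dict String Int :=
  PySem.Dict.mk [("run_on", a), ("subject_verb", b), ("tense", c), ("article", d),
                 ("preposition", e), ("punctuation", f)]

lemma pv_row_step (row : List (String × List (String × Int))) (a b c d e f : Int) :
    pvKeys.foldl (fun c key => c.insert key (c.getD key 0 + pvStat row key)) (pvMk6 a b c d e f)
      = pvMk6 (a + pvStat row "run_on") (b + pvStat row "subject_verb") (c + pvStat row "tense")
              (d + pvStat row "article") (e + pvStat row "preposition") (f + pvStat row "punctuation") := by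
  simp [pvKeys, pvMk6, PySem.Dict.insert, PySem.Dict.getD, PySem.Dict.get?]

lemma pv_row_step0 (row : List (String × List (String × Int))) :
    pvKeys.foldl (fun c key => c.insert key (c.getD key 0 + pvStat row key)) PySem.Dict.empty
      = pvMk6 (0 + pvStat row "run_on") (0 + pvStat row "subject_verb") (0 + pvStat row "tense")
              (0 + pvStat row "article") (0 + pvStat row "preposition") (0 + pvStat row "punctuation") := by
  simp [pvKeys, pvMk6, PySem.Dict.insert, PySem.Dict.getD, PySem.Dict.get?, PySem.Dict.empty]

lemma pv_fold_rows (rs : List (List (String × List (String × Int)))) :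
    ∀ a b c d e f : Int,
    rs.foldl (fun c row => pvKeys.foldl (fun c key => c.insert key (c.getD key 0 + pvStat row key)) c)
      (pvMk6 a b c d e f)
      = pvMk6 (a + (rs.map (pvStat · "run_on")).sum) (b + (rs.map (pvStat · "subject_verb")).sum)
              (c + (rs.map (pvStat · "tense")).sum) (d + (rs.map (pvStat · "article")).sum)
              (e + (rs.map (pvStat · "preposition")).sum) (f + (rs.map (pvStat · "punctuation")).sum) := by
  induction rs with
  | nil => intro a b c d e f; simp
  | cons r rs ih =>
    intro a b c d e f
    rw [List.foldl_cons, pv_row_step, ih]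
    simp only [List.map_cons, List.sum_cons, pvMk6]
    ring_nf

-- max? of a snoc is one fold step on max? of the prefix
lemma pv_max?_snoc_none (xs : List (String × Int)) (x : String × Int)
    (hmx : PySem.List.max? xs (fun kv => kv.2) = none) :
    PySem.List.max? (xs ++ [x]) (fun kv => kv.2) = some x := by
  unfold PySem.List.max? at hmx ⊢
  rw [List.foldl_append, hmx]
  rfl

lemma pv_max?_snoc_some (xs : List (String × Int)) (x m : String × Int)
    (hmx : PySem.List.max? xs (fun kv => kv.2) = some m) :
    PySem.List.max? (xs ++ [x]) (fun kv => kv.2)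
      = if m.2 < x.2 then some x else some m := by
  unfold PySem.List.max? at hmx ⊢
  rw [List.foldl_append, hmx]
  rfl

-- stable reverse sort of a snoc = insert the new element into the sorted prefix
lemma pv_sorted_rev_snoc (xs : List (String × Int)) (x : String × Int) :
    PySem.List.sorted (xs ++ [x]) (fun kv => kv.2) true
      = PySem.List.insertBy (fun a b => decide (b.2 < a.2)) x
          (PySem.List.sorted xs (fun kv => kv.2) true) := by
  rw [PySem.List.sorted_rev_eq_foldl_insertBy, PySem.List.sorted_rev_eq_foldl_insertBy,
    List.foldl_append]
  rfl

-- the stable reverse sort extracts the FIRST maximum at the head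
lemma pv_sorted_rev_extract (xs : List (String × Int)) :
    ∀ m : String × Int, PySem.List.max? xs (fun kv => kv.2) = some m →
    PySem.List.sorted xs (fun kv => kv.2) true
      = m :: PySem.List.sorted (xs.erase m) (fun kv => kv.2) true := by
  induction xs using List.reverseRecOn with
  | nil => intro m h; simp [PySem.List.max?] at h
  | append_singleton xs x ih =>
    intro m h
    cases hmx : PySem.List.max? xs (fun kv => kv.2) with
    | none =>
      rw [pv_max?_snoc_none xs x hmx] at h
      cases (PySem.List.max?_eq_none_iff xs (fun kv => kv.2)).1 hmx
      simp only [Option.some.injEq] at h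
      subst h
      simp [PySem.List.sorted, PySem.List.insertBy]
    | some m0 =>
      rw [pv_max?_snoc_some xs x m0 hmx] at h
      by_cases hlt : m0.2 < x.2
      · simp only [hlt, if_pos, Option.some.injEq] at h
        subst h
        have hnot : x ∉ xs := by
          intro hmem
          exact absurd (lt_of_le_of_lt (PySem.List.max?_isMax hmx x hmem) hlt) (lt_irrefl _)
        rw [List.erase_append_right _ hnot]
        simp only [List.erase_cons_head, List.append_nil]
        rw [pv_sorted_rev_snoc, ih m0 hmx]
        simp [PySem.List.insertBy, hlt, ← ih m0 hmx]
      · simp only [hlt, if_neg, Option.some.injEq, not_false_iff] at h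
        subst h
        have hmem : m0 ∈ xs := PySem.List.max?_mem hmx
        rw [List.erase_append_left _ hmem, pv_sorted_rev_snoc, ih m0 hmx]
        simp only [PySem.List.insertBy, hlt, decide_false]
        rw [if_neg (by simp), ← pv_sorted_rev_snoc]

-- most_common(3)-then-filter equals repeated first-maximum selection with early stop
lemma pv_select_eq (n : Nat) : ∀ pairs : List (String × Int),
    ((PySem.List.sorted pairs (fun kv => kv.2) true).take n).filterMap
        (fun kv => if kv.2 > 0 then some (kv.1 ++ " (" ++ PySem.Int.toStr kv.2 ++ ")") else none)
      = pvSelect pairs n := by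
  induction n with
  | zero => intro pairs; simp [pvSelect]
  | succ n ih =>
    intro pairs
    cases hmx : PySem.List.max? pairs (fun kv => kv.2) with
    | none =>
      cases (PySem.List.max?_eq_none_iff pairs (fun kv => kv.2)).1 hmx
      simp [pvSelect, PySem.List.sorted, PySem.List.max?]
    | some m =>
      rw [pv_sorted_rev_extract pairs m hmx]
      by_cases hpos : m.2 ≤ 0
      · have hall : ∀ kv ∈ m :: PySem.List.sorted (pairs.erase m) (fun kv => kv.2) true,
            (kv : String × Int).2 ≤ 0 := by
          intro kv hkv
          rcases List.mem_cons.1 hkv with h | h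
          · exact h ▸ hpos
          · have : kv ∈ pairs :=
              List.mem_of_mem_erase ((PySem.List.mem_sorted _ _ _ _).1 h)
            exact le_trans (PySem.List.max?_isMax hmx kv this) hpos
        have : ∀ kv ∈ (m :: PySem.List.sorted (pairs.erase m) (fun kv => kv.2) true).take (n+1),
            (if (kv : String × Int).2 > 0
              then some (kv.1 ++ " (" ++ PySem.Int.toStr kv.2 ++ ")") else none) = none := by
          intro kv hkv
          have := hall kv (List.mem_of_mem_take hkv)
          simp only [if_neg (by omega : ¬ kv.2 > 0)]
        rw [List.filterMap_eq_nil_iff.2 this]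
        simp [pvSelect, hmx, hpos]
      · rw [List.take_succ_cons, List.filterMap_cons]
        simp only [if_pos (by omega : m.2 > 0)]
        rw [ih (pairs.erase m)]
        simp [pvSelect, hmx, hpos]

-- ===== VERDICT (by name: the statement is the Claim_ definition above) =====
theorem personal_weakness_ranking_spec : Claim_equal_personal_weakness_ranking := by
  intro rows limit _
  unfold Spec_personal_weakness_ranking personal_weakness_ranking personal_weakness_ranking_alt
  cases hrec : PySem.List.slice rows (some (-limit)) none with
  | nil => decide
  | cons r rs =>
    dsimp only
    rw [List.foldl_cons, pv_row_step0, pv_fold_rows]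
    rw [← pv_select_eq 3]
    simp only [pvKeys, pvMk6, List.map_cons, List.map_nil, List.sum_cons, zero_add]
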